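-- pv_equiv track=rewrite | github.com/TheSchwa1337/clonerepo | backup_before_reorganization_20250723_013430/AOI_Base_Files_Schwabot/mathlib/mathlib_v4.py | validate_consensus_hash
-- ===== SOURCE A (Python) =====
-- from typing import List, Tuple, Dict, Optional, Union
--
-- def validate_consensus_hash(h_list: List[str]) -> Tuple[bool, str]:
--     """
--     Validate multi-agent hash consensus
--     Returns (is_valid, consensus_hash)
--     """
--     if len(h_list) < 2:
--         return False, ""
--
--     # Count occurrences
--     hash_counts = {}
--     for h in h_list:
--         hash_counts[h] = hash_counts.get(h, 0) + 1
--
--     # Find majority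
--     max_count = max(hash_counts.values())
--     threshold = len(h_list) / 2
--
--     if max_count > threshold:
--         consensus = [h for h, c in hash_counts.items() if c == max_count][0]
--         return True, consensus
--
--     return False, ""
-- ===== SOURCE B (Python) =====
-- def validate_consensus_hash(h_list):
--     """Boyer-Moore majority vote: one scan for a candidate, one count to verify."""
--     if len(h_list) < 2:
--         return False, ""
--     candidate, count = "", 0
--     for h in h_list:
--         if count == 0:
--             candidate, count = h, 1
--         elif h == candidate:
--             count += 1
--         else:
--             count -= 1
--     if 2 * h_list.count(candidate) > len(h_list):
--         return True, candidate
--     return False, ""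
-- ===== Notes on version B (the rewrite author's own statement) =====
-- stated objective: alternative
-- what changed: Replaces the count-dictionary + max + filtered-comprehension lookup with the Boyer-Moore majority vote: one candidate/counter scan followed by a single verification count.
import Mathlib
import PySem

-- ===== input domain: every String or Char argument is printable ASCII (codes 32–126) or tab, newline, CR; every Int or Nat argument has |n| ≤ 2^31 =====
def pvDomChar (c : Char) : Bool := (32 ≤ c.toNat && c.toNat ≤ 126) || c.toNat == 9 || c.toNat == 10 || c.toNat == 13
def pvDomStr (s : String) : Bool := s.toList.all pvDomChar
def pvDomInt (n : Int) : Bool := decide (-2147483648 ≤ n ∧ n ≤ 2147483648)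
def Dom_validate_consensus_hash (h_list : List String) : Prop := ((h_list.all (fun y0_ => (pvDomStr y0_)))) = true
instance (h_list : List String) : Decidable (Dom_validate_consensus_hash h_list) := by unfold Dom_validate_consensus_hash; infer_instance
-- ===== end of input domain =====

-- B replaces A's count-dictionary + max + filtered comprehension with the Boyer-Moore
-- majority vote (candidate/counter scan, then one verification count): an alternative
-- algorithm of the same O(n) cost.

-- ===== PORT A =====
def validate_consensus_hash (h_list : List String) : Bool × String :=
  if h_list.length < 2 then (false, "")
  else
    -- hash_counts[h] = hash_counts.get(h, 0) + 1
    let hash_counts := h_list.foldl (fun d h => d.insert h (d.getD h 0 + 1)) PySem.Dict.empty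
    -- max(hash_counts.values()); the dict is provably non-empty (length ≥ 2), so the
    -- Option is always some and the .getD 0 default is unreachable
    let max_count := (PySem.List.max? hash_counts.values (fun v => v)).getD 0
    -- Python compares max_count > len(h_list)/2 with float division; len ≤ 2^31 so
    -- len/2 is exact in float and the comparison equals the integer test 2*max_count > len
    if 2 * max_count > (h_list.length : Int) then
      -- [h for h, c in hash_counts.items() if c == max_count][0]; the list provably
      -- contains a key of maximal count, so the [0] never raises and headD "" is exact
      (true, ((hash_counts.items.filter (fun p => p.2 == max_count)).map Prod.fst).headD "")
    else (false, "")

-- ===== PORT B =====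
def bmStep (s : String × Int) (h : String) : String × Int :=
  if s.2 = 0 then (h, 1)
  else if h = s.1 then (s.1, s.2 + 1)
  else (s.1, s.2 - 1)

def validate_consensus_hash_alt (h_list : List String) : Bool × String :=
  if h_list.length < 2 then (false, "")
  else
    let s := h_list.foldl bmStep ("", 0)
    if 2 * (h_list.count s.1 : Int) > (h_list.length : Int) then (true, s.1)
    else (false, "")

-- ===== PRECONDITION & SPEC =====
def Spec_validate_consensus_hash (h_list : List String) (out : Bool × String) : Prop := out = validate_consensus_hash_alt h_list
instance (h_list : List String) (out : Bool × String) : Decidable (Spec_validate_consensus_hash h_list out) := by unfold Spec_validate_consensus_hash; infer_instance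

-- ===== CLAIM (what is proved, stated in full; the proofs are below) =====
def Claim_equal_validate_consensus_hash : Prop := ∀ (h_list : List String), Dom_validate_consensus_hash h_list → Spec_validate_consensus_hash h_list (validate_consensus_hash h_list)

-- ===== LEMMAS AND PROOFS =====

-- potential of a candidate x under a Boyer-Moore state
def bmF (x : String) (s : String × Int) : Int := if x = s.1 then s.2 else -s.2

theorem bmStep_f (x h : String) (s : String × Int) :
    bmF x s + (if h = x then (1:Int) else -1) ≤ bmF x (bmStep s h) := by
  rcases s with ⟨c, k⟩
  by_cases hk : k = 0 <;> by_cases hhc : h = c <;> by_cases hxc : x = c <;>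
    by_cases hhx : h = x <;> simp_all [bmF, bmStep] <;> omega

theorem bm_fold (l : List String) (x : String) : ∀ s : String × Int,
    bmF x s + 2 * (l.count x : Int) - l.length ≤ bmF x (l.foldl bmStep s) := by
  induction l with
  | nil => intro s; simp
  | cons h t ih =>
    intro s
    have h1 := bmStep_f x h s
    have h2 := ih (bmStep s h)
    simp only [List.foldl_cons, List.length_cons]
    by_cases hx : h = x
    · subst hx
      rw [if_pos rfl] at h1
      rw [List.count_cons_self]
      push_cast at h2 ⊢
      omega
    · rw [if_neg hx] at h1
      rw [List.count_cons_of_ne hx]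
      push_cast at h2 ⊢
      omega

theorem bm_cnt_nonneg (l : List String) : ∀ s : String × Int,
    0 ≤ s.2 → 0 ≤ (l.foldl bmStep s).2 := by
  induction l with
  | nil => intro s h; simpa using h
  | cons h t ih =>
    intro s hs
    refine ih _ ?_
    rcases s with ⟨c, k⟩
    simp only [bmStep]
    split_ifs <;> simp_all <;> omega

theorem bm_majority (l : List String) (x : String)
    (hmaj : (l.length : Int) < 2 * l.count x) : (l.foldl bmStep ("", 0)).1 = x := by
  by_contra hne
  have h1 := bm_fold l x ("", 0)
  have h2 := bm_cnt_nonneg l ("", 0) (by simp)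
  have h0 : bmF x ("", 0) = 0 := by simp [bmF]
  have h3 : bmF x (l.foldl bmStep ("", 0)) = -(l.foldl bmStep ("", 0)).2 := by
    rw [bmF, if_neg (fun e => hne e.symm)]
  omega

theorem count_add_count_le {α : Type} [DecidableEq α] (l : List α) (a b : α) (hab : a ≠ b) :
    l.count a + l.count b ≤ l.length := by
  induction l with
  | nil => simp
  | cons h t ih =>
    rcases eq_or_ne h a with rfl | ha
    · rw [List.count_cons_self, List.count_cons_of_ne hab]
      simp only [List.length_cons]; omega
    · rcases eq_or_ne h b with rfl | hb
      · rw [List.count_cons_self, List.count_cons_of_ne ha]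
        simp only [List.length_cons]; omega
      · rw [List.count_cons_of_ne ha, List.count_cons_of_ne hb]
        simp only [List.length_cons]; omega

theorem headD_eq_of_all {α : Type} (xs : List α) (x d : α) (hne : xs ≠ [])
    (hall : ∀ y ∈ xs, y = x) : xs.headD d = x := by
  cases xs with
  | nil => exact absurd rfl hne
  | cons h t => exact hall h (by simp)

-- ===== VERDICT (by name: the statement is the Claim_ definition above) =====
theorem validate_consensus_hash_spec : Claim_equal_validate_consensus_hash := by
  intro l _
  unfold Spec_validate_consensus_hash validate_consensus_hash validate_consensus_hash_alt
  by_cases hlen : l.length < 2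
  · simp [hlen]
  · simp only [hlen, if_false]
    have hlnil : l ≠ [] := by
      intro h; subst h; simp at hlen
    -- the counting dict is Counter(l)
    rw [PySem.Dict.foldl_insert_getD_add_one_eq_counter]
    have hvals : (PySem.Dict.counter l).values
        = (PySem.Set.ofList l).map (fun k => (l.count k : Int)) := by
      have := PySem.Dict.items_counter (xs := l)
      simp [PySem.Dict.values, this]
    have hsetne : PySem.Set.ofList l ≠ [] := by
      cases l with
      | nil => exact absurd rfl hlnil
      | cons h t =>
        intro hc
        have : h ∈ PySem.Set.ofList (h :: t) := by
          rw [PySem.Set.mem_ofList]; simp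
        rw [hc] at this; simp at this
    have hvne : (PySem.Dict.counter l).values ≠ [] := by
      rw [hvals]; simpa using hsetne
    obtain ⟨m, hm⟩ : ∃ m, PySem.List.max? (PySem.Dict.counter l).values (fun v => v) = some m := by
      cases hmx : PySem.List.max? (PySem.Dict.counter l).values (fun v => v) with
      | none => exact absurd ((PySem.List.max?_eq_none_iff (xs := (PySem.Dict.counter l).values) (key := fun v => v)).mp hmx) hvne
      | some m => exact ⟨m, rfl⟩
    have hmmem : m ∈ (PySem.Dict.counter l).values := PySem.List.max?_mem hm
    have hmax : ∀ y ∈ (PySem.Dict.counter l).values, y ≤ m := by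
      intro y hy; exact PySem.List.max?_isMax hm y hy
    rw [hvals] at hmmem
    obtain ⟨k0, hk0mem, hk0⟩ := List.mem_map.mp hmmem
    rw [hm]
    simp only [Option.getD_some]
    by_cases hthr : 2 * m > (l.length : Int)
    · -- majority exists: it is k0, unique
      have hk0l : k0 ∈ l := (PySem.Set.mem_ofList _ _).mp hk0mem
      have hk0maj : (l.length : Int) < 2 * l.count k0 := by rw [hk0]; omega
      -- uniqueness of a strict-majority element
      have huniq : ∀ y, (l.length : Int) < 2 * l.count y → y = k0 := by
        intro y hy
        by_contra hne
        have := count_add_count_le l y k0 hne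
        push_cast at hy hk0maj
        omega
      -- B side
      have hbm : (l.foldl bmStep ("", 0)).1 = k0 := bm_majority l k0 hk0maj
      rw [if_pos hthr, hbm, if_pos (by omega)]
      -- A side: the filtered key list is all-k0 and non-empty
      have hitems : (PySem.Dict.counter l).items
          = (PySem.Set.ofList l).map (fun k => (k, (l.count k : Int))) :=
        PySem.Dict.items_counter l
      have hfilt : ∀ p ∈ (PySem.Dict.counter l).items.filter (fun p => p.2 == m), p.1 = k0 := by
        intro p hp
        rw [List.mem_filter, hitems] at hp
        obtain ⟨hpmem, hpc⟩ := hp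
        obtain ⟨k, _, hk⟩ := List.mem_map.mp hpmem
        subst hk
        simp only [beq_iff_eq] at hpc
        exact huniq k (by omega)
      have hfne : (PySem.Dict.counter l).items.filter (fun p => p.2 == m) ≠ [] := by
        have : (k0, (l.count k0 : Int)) ∈ (PySem.Dict.counter l).items.filter (fun p => p.2 == m) := by
          rw [List.mem_filter, hitems]
          refine ⟨List.mem_map.mpr ⟨k0, hk0mem, rfl⟩, by simp [hk0]⟩
        intro hc; rw [hc] at this; simp at this
      have hhead : (((PySem.Dict.counter l).items.filter (fun p => p.2 == m)).map Prod.fst).headD "" = k0 := by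
        apply headD_eq_of_all
        · simpa using hfne
        · intro y hy
          obtain ⟨p, hp, hpy⟩ := List.mem_map.mp hy
          subst hpy; exact hfilt p hp
      rw [hhead]
    · -- no strict majority: both return (false, "")
      simp only [hthr, if_false]
      have hnomaj : ∀ x : String, ¬ (2 * (l.count x : Int) > (l.length : Int)) := by
        intro x hx
        by_cases hxl : x ∈ l
        · have : (l.count x : Int) ∈ (PySem.Dict.counter l).values := by
            rw [hvals]
            exact List.mem_map.mpr ⟨x, (PySem.Set.mem_ofList _ _).mpr hxl, rfl⟩
          have := hmax _ this
          omega
        · rw [List.count_eq_zero_of_not_mem hxl] at hx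
          push_cast at hx
          omega
      rw [if_neg (hnomaj _)]
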